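-- pv_equiv track=rewrite | github.com/xonq/mycotools | mycotools/utils/og2mycodb.py | extract_ogs
-- ===== SOURCE A (Python) =====
-- def extract_ogs(ogInfo_dict, ogtag):
--
--     og2gene, gene2og = {}, {}
--     for gene in ogInfo_dict:
--         if ogtag in ogInfo_dict[gene]:
--             og = ogInfo_dict[gene][ogtag]
--             if og not in og2gene:
--                 og2gene[og] = []
--             og2gene[og].append(gene)
--             gene2og[gene] = og
--
--     return og2gene, gene2og
-- ===== SOURCE B (Python) =====
-- def extract_ogs(ogInfo_dict, ogtag):
--     # stage 1: flatten the input to the list of (gene, og) matches, in input order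
--     pairs = [(gene, info[ogtag]) for gene, info in ogInfo_dict.items() if ogtag in info]
--     gene2og = dict(pairs)
--     # stage 2: one filtering scan of the flat pair list per distinct og
--     og_order = list(dict.fromkeys(og for _, og in pairs))
--     og2gene = {og: [g for g, o in pairs if o == og] for og in og_order}
--     return og2gene, gene2og
-- ===== Notes on version B (the rewrite author's own statement) =====
-- stated objective: alternative
-- what changed: A builds og2gene and gene2og together in one fused loop that incrementally grows per-og lists in a dict; B is a staged pipeline: it flattens the input to a (gene, og) pair list, takes gene2og = dict(pairs), computes the distinct ogs in first-appearance order, and builds each og's gene list by its own filtering scan of the pair list; Pre_ excludes association lists with duplicate outer keys, which cannot arise from a Python dict.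
import Mathlib
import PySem

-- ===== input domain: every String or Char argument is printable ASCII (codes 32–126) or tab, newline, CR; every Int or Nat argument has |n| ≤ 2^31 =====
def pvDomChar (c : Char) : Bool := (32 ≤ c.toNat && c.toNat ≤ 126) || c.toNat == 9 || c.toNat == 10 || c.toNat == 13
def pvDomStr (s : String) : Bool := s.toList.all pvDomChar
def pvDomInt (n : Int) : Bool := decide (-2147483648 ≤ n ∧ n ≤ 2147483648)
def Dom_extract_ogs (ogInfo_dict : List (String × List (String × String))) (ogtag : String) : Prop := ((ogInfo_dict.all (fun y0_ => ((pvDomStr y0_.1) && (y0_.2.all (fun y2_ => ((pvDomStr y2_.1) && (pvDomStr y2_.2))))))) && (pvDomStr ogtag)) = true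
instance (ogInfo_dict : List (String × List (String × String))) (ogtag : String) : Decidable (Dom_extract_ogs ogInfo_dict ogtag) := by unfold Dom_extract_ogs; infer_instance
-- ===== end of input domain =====

-- B replaces A's fused incremental dict-grouping loop with a staged pipeline: flatten the input
-- to a (gene, og) pair list, then build each og's gene list by its own filtering scan of that list.

-- ===== PORT A =====
-- one fused loop over the dict, maintaining (og2gene, gene2og) together
def extract_ogs (ogInfo_dict : List (String × List (String × String))) (ogtag : String) : (List (String × List String)) × (List (String × String)) :=
  let r := ogInfo_dict.foldl (fun st p =>
    -- `ogtag in ogInfo_dict[gene]` + `og = ogInfo_dict[gene][ogtag]`: present iff get? is some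
    match (PySem.Dict.mk p.2).get? ogtag with
    | none => st
    | some og =>
        let og2gene := if st.1.contains og then st.1 else st.1.insert og []
        (og2gene.modify og [] (fun gs => gs ++ [p.1]), st.2.insert p.1 og))
    ((PySem.Dict.empty : PySem.Dict String (List String)), (PySem.Dict.empty : PySem.Dict String String))
  (r.1.items, r.2.items)

-- ===== PORT B =====
-- stage 1: the flat pair list and gene2og = dict(pairs); stage 2: one filtering scan per distinct og.
-- The og2gene dict comprehension ranges over dict.fromkeys' keys, which carry no duplicates on ANY
-- input, so building that dict is exactly the List.map below (no overwrite can ever occur).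
def extract_ogs_alt (ogInfo_dict : List (String × List (String × String))) (ogtag : String) : (List (String × List String)) × (List (String × String)) :=
  let pairs := ogInfo_dict.filterMap (fun p => ((PySem.Dict.mk p.2).get? ogtag).map (fun og => (p.1, og)))
  let gene2og := pairs.foldl (fun d q => d.insert q.1 q.2) (PySem.Dict.empty : PySem.Dict String String)
  let og_order := PySem.List.dedup (pairs.map Prod.snd)
  let og2gene := og_order.map (fun og => (og, (pairs.filter (fun q => q.2 == og)).map Prod.fst))
  (og2gene, gene2og.items)

-- ===== PRECONDITION & SPEC =====
-- The association list encodes a Python dict, whose keys are unique: Pre_ excludes duplicate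
-- outer keys, which no Python dict argument can produce (A never raises; no returning input is excluded).
def Pre_extract_ogs (ogInfo_dict : List (String × List (String × String))) (ogtag : String) : Prop :=
  (ogInfo_dict.map Prod.fst).Nodup
instance (ogInfo_dict : List (String × List (String × String))) (ogtag : String) : Decidable (Pre_extract_ogs ogInfo_dict ogtag) := by unfold Pre_extract_ogs; infer_instance
def pvWitness_extract_ogs : (List (String × List (String × String))) × String :=
  ([("g1", [("og", "O1")]), ("g2", [("og", "O1"), ("x", "Z")])], "og")
def Spec_extract_ogs (ogInfo_dict : List (String × List (String × String))) (ogtag : String) (out : (List (String × List String)) × (List (String × String))) : Prop := out = extract_ogs_alt ogInfo_dict ogtag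
instance (ogInfo_dict : List (String × List (String × String))) (ogtag : String) (out : (List (String × List String)) × (List (String × String))) : Decidable (Spec_extract_ogs ogInfo_dict ogtag out) := by unfold Spec_extract_ogs; infer_instance

-- ===== CLAIM (what is proved, stated in full; the proofs are below) =====
def Claim_equal_extract_ogs : Prop := ∀ (ogInfo_dict : List (String × List (String × String))) (ogtag : String), Dom_extract_ogs ogInfo_dict ogtag → Pre_extract_ogs ogInfo_dict ogtag → Spec_extract_ogs ogInfo_dict ogtag (extract_ogs ogInfo_dict ogtag)

-- ===== LEMMAS AND PROOFS =====

-- the "gene matched ogtag" selector shared by both analyses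
def pvSel (ogtag : String) (p : String × List (String × String)) : Option (String × String) :=
  ((PySem.Dict.mk p.2).get? ogtag).map (fun og => (p.1, og))

-- inserting the default just before an "append" modify at the same absent key changes nothing
lemma modify_insert_absent (d : PySem.Dict String (List String)) (og : String)
    (f : List String → List String) (h : d.contains og = false) :
    (d.insert og []).modify og [] f = d.modify og [] f := by
  have han : (d.items.any fun p => p.1 == og) = false := by
    simpa [PySem.Dict.contains] using h
  have hmem : ∀ p ∈ d.items, (p.1 == og) = false := by
    intro p hp; simpa using List.any_eq_false.mp han p hp
  have hfind : d.items.find? (fun p => p.1 == og) = none :=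
    List.find?_eq_none.mpr (by intro p hp; simp [hmem p hp])
  have hmap : ∀ c : List String,
      d.items.map (fun p => if p.1 = og then (og, c) else p) = d.items := by
    intro c
    conv_rhs => rw [← List.map_id d.items]
    apply List.map_congr_left
    intro p hp
    have hne := hmem p hp
    simp only [beq_eq_false_iff_ne, ne_eq] at hne
    simp [hne]
  simp [PySem.Dict.modify, PySem.Dict.insert, PySem.Dict.getD, PySem.Dict.get?,
        PySem.Dict.contains, han, hfind, List.find?_append, List.any_append, List.map_append]
  exact hmap (f [])

-- A's ensure-then-append step is a single appending modify
lemma stepA_eq_modify (d : PySem.Dict String (List String)) (og g : String) :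
    (if d.contains og then d else d.insert og []).modify og [] (fun gs => gs ++ [g])
      = d.modify og [] (fun gs => gs ++ [g]) := by
  by_cases h : d.contains og = true
  · rw [if_pos h]
  · rw [if_neg h, modify_insert_absent d og _ (by simpa using h)]

-- A's fused loop splits into the grouping fold over the matches and the gene2og fold
lemma loop_split (ogtag : String) (l : List (String × List (String × String)))
    (d1 : PySem.Dict String (List String)) (d2 : PySem.Dict String String) :
    l.foldl (fun st p =>
      match (PySem.Dict.mk p.2).get? ogtag with
      | none => st
      | some og =>
          let og2gene := if st.1.contains og then st.1 else st.1.insert og []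
          (og2gene.modify og [] (fun gs => gs ++ [p.1]), st.2.insert p.1 og)) (d1, d2)
    = ((l.filterMap (pvSel ogtag)).foldl (fun d q => d.modify q.2 [] (fun gs => gs ++ [q.1])) d1,
       (l.filterMap (pvSel ogtag)).foldl (fun d q => d.insert q.1 q.2) d2) := by
  induction l generalizing d1 d2 with
  | nil => rfl
  | cons a t ih =>
      have hs : pvSel ogtag a = ((PySem.Dict.mk a.2).get? ogtag).map (fun og => (a.1, og)) := rfl
      simp only [List.foldl_cons, List.filterMap_cons, hs]
      cases h : (PySem.Dict.mk a.2).get? ogtag with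
      | none => simp only [Option.map_none]; exact ih d1 d2
      | some og =>
          simp only [Option.map_some, List.foldl_cons]
          rw [stepA_eq_modify]
          exact ih _ _

-- the matched genes are a sublist of all genes
lemma fst_filterMap_sublist (ogtag : String) (l : List (String × List (String × String))) :
    ((l.filterMap (pvSel ogtag)).map Prod.fst).Sublist (l.map Prod.fst) := by
  induction l with
  | nil => simp
  | cons a t ih =>
      have hs : pvSel ogtag a = ((PySem.Dict.mk a.2).get? ogtag).map (fun og => (a.1, og)) := rfl
      simp only [List.filterMap_cons, List.map_cons, hs]
      cases h : (PySem.Dict.mk a.2).get? ogtag with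
      | none => simpa [h] using ih.cons _
      | some og => simpa [h] using List.Sublist.cons₂ a.1 ih

-- with unique genes, gene2og's items ARE the matched (gene, og) pairs in input order
lemma items_gene2og (ogtag : String) (l : List (String × List (String × String)))
    (h : (l.map Prod.fst).Nodup) :
    ((l.filterMap (pvSel ogtag)).foldl (fun d q => d.insert q.1 q.2)
      (PySem.Dict.empty : PySem.Dict String String)).items
    = l.filterMap (pvSel ogtag) := by
  have hnd : ((l.filterMap (pvSel ogtag)).map Prod.fst).Nodup :=
    h.sublist (fst_filterMap_sublist ogtag l)
  have := PySem.Dict.items_foldl_insert_fresh (l := l.filterMap (pvSel ogtag))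
    (k := Prod.fst) (v := Prod.snd) (d := PySem.Dict.empty)
    (by intro a _; simp) hnd
  simpa using this

-- the grouping fold's items are: the distinct ogs in first-appearance order, each paired with
-- the genes collected by filtering the pair list at that og
lemma items_grouping (pairs : List (String × String)) :
    (pairs.foldl (fun d q => d.modify q.2 [] (fun gs => gs ++ [q.1]))
      (PySem.Dict.empty : PySem.Dict String (List String))).items
    = (PySem.List.dedup (pairs.map Prod.snd)).map
        (fun og => (og, (pairs.filter (fun q => q.2 == og)).map Prod.fst)) := by
  have hswap : pairs.foldl (fun d q => d.modify q.2 [] (fun gs => gs ++ [q.1]))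
      (PySem.Dict.empty : PySem.Dict String (List String))
    = (pairs.map (fun q => (q.2, q.1))).foldl (fun d p => d.modify p.1 [] (fun gs => gs ++ [p.2]))
      (PySem.Dict.empty : PySem.Dict String (List String)) := by
    rw [List.foldl_map]
  have hkeys : (pairs.foldl (fun d q => d.modify q.2 [] (fun gs => gs ++ [q.1]))
      (PySem.Dict.empty : PySem.Dict String (List String))).keys
      = PySem.Set.ofList (pairs.map Prod.snd) := by
    rw [PySem.Dict.keys_foldl_modify_key (key := Prod.snd)]
    simp [PySem.Dict.keys_empty, PySem.Set.update_nil_left]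
  have hnd : (pairs.foldl (fun d q => d.modify q.2 [] (fun gs => gs ++ [q.1]))
      (PySem.Dict.empty : PySem.Dict String (List String))).keys.Nodup := by
    rw [hkeys]; exact PySem.Set.nodup_ofList _
  have hgetD : ∀ og, (pairs.foldl (fun d q => d.modify q.2 [] (fun gs => gs ++ [q.1]))
      (PySem.Dict.empty : PySem.Dict String (List String))).getD og []
      = (pairs.filter (fun q => q.2 == og)).map Prod.fst := by
    intro og
    rw [hswap, PySem.Dict.getD_foldl_modify_append]
    rw [List.filter_map, List.map_map]
    simp only [PySem.Dict.getD_empty, List.nil_append]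
    rfl
  rw [PySem.Dict.items_eq_map_keys _ hnd [], hkeys, PySem.List.dedup_eq_ofList]
  apply List.map_congr_left
  intro og _
  rw [hgetD]

-- ===== VERDICT (by name: the statement is the Claim_ definition above) =====
theorem extract_ogs_spec : Claim_equal_extract_ogs := by
  intro l ogtag _ hpre
  unfold Spec_extract_ogs extract_ogs extract_ogs_alt
  have hsel : (fun (p : String × List (String × String)) =>
      ((PySem.Dict.mk p.2).get? ogtag).map (fun og => (p.1, og))) = pvSel ogtag := rfl
  rw [loop_split]
  simp only [hsel]
  rw [items_gene2og ogtag l hpre, items_grouping]
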